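-- pv_equiv track=rewrite | github.com/Eliott-B/calculatrice | src/packageCalc/calculatrice.py | soustraction
-- ===== SOURCE A (Python) =====
-- def soustraction(a, b):
--     res = a
--     if b >= 0:
--         while (b - 1) >= 0:
--             b -= 1
--             res -= 1
--     elif b < 0:
--         while (b + 1) <= 0:
--             b += 1
--             res += 1
--     return res
-- ===== SOURCE B (Python) =====
-- def soustraction(a, b):
--     # Closed form: subtracting b is the same as b decrement steps.
--     return a - b
-- ===== Notes on version B (the rewrite author's own statement) =====
-- stated objective: simpler
-- what changed: Replaced both O(|b|) counting loops with the closed-form arithmetic a - b.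
import Mathlib
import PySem

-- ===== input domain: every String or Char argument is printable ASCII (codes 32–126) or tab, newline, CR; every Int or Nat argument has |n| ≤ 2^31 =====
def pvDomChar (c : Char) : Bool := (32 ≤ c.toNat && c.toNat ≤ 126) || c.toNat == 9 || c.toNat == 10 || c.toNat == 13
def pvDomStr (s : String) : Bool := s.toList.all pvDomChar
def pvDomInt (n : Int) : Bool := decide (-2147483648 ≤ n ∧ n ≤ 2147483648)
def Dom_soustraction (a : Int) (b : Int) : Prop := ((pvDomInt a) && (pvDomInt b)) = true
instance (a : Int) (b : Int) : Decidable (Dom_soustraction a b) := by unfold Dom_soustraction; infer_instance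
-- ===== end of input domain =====

-- B replaces A's two counting loops by the closed form a - b (simpler, O(1)).


-- ===== PORT A =====
-- while (b - 1) >= 0: b -= 1; res -= 1   (fuel = b.natAbs suffices; loop guard checked each step)
def soustractionLoopPos (fuel : Nat) (b res : Int) : Int :=
  match fuel with
  | 0 => res
  | n + 1 => if b - 1 ≥ 0 then soustractionLoopPos n (b - 1) (res - 1) else res

-- while (b + 1) <= 0: b += 1; res += 1
def soustractionLoopNeg (fuel : Nat) (b res : Int) : Int :=
  match fuel with
  | 0 => res
  | n + 1 => if b + 1 ≤ 0 then soustractionLoopNeg n (b + 1) (res + 1) else res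

def soustraction (a : Int) (b : Int) : Int :=
  if b ≥ 0 then soustractionLoopPos b.natAbs b a
  else if b < 0 then soustractionLoopNeg b.natAbs b a
  else a

-- ===== PORT B =====
def soustraction_alt (a : Int) (b : Int) : Int := a - b

-- ===== PRECONDITION & SPEC =====
def Spec_soustraction (a : Int) (b : Int) (out : Int) : Prop := out = soustraction_alt a b
instance (a : Int) (b : Int) (out : Int) : Decidable (Spec_soustraction a b out) := by unfold Spec_soustraction; infer_instance

-- ===== CLAIM (what is proved, stated in full; the proofs are below) =====
def Claim_equal_soustraction : Prop := ∀ (a : Int) (b : Int), Dom_soustraction a b → Spec_soustraction a b (soustraction a b)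

-- ===== LEMMAS AND PROOFS =====
-- ===== VERDICT (by name: the statement is the Claim_ definition above) =====
lemma soustractionLoopPos_eq (n : Nat) : ∀ (b res : Int), 0 ≤ b → b.natAbs ≤ n →
    soustractionLoopPos n b res = res - b := by
  induction n with
  | zero => intro b res hb hn; simp [soustractionLoopPos]; omega
  | succ k ih =>
    intro b res hb hn
    simp only [soustractionLoopPos]
    split
    · rw [ih (b - 1) (res - 1) (by omega) (by omega)]; ring
    · omega

lemma soustractionLoopNeg_eq (n : Nat) : ∀ (b res : Int), b ≤ 0 → b.natAbs ≤ n →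
    soustractionLoopNeg n b res = res - b := by
  induction n with
  | zero => intro b res hb hn; simp [soustractionLoopNeg]; omega
  | succ k ih =>
    intro b res hb hn
    simp only [soustractionLoopNeg]
    split
    · rw [ih (b + 1) (res + 1) (by omega) (by omega)]; ring
    · omega

theorem soustraction_spec : Claim_equal_soustraction := by
  intro a b _
  unfold Spec_soustraction soustraction soustraction_alt
  split
  · exact soustractionLoopPos_eq b.natAbs b a (by omega) le_rfl
  · split
    · exact soustractionLoopNeg_eq b.natAbs b a (by omega) le_rfl
    · omega
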